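-- pv_equiv track=rewrite | github.com/kipp12/FYP_Propaganda_Detection | src/data/bio.py | word_bio_to_char_offsets
-- ===== SOURCE A (Python) =====
-- def word_bio_to_char_offsets(tagged_tokens: list) -> list:
--     """
--     Reconstruct character-level span offsets from word-level BIO predictions.
--
--     Args:
--         tagged_tokens: list of (word, tag, char_start, char_end)
--
--     Returns:
--         List of (start, end) character offset tuples.
--     """
--     spans = []
--     span_start = None
--     span_end = None
--
--     for _, tag, start, end in tagged_tokens:
--         if tag == 'B':
--             if span_start is not None:
--                 spans.append((span_start, span_end))
--             span_start = start
--             span_end = end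
--         elif tag == 'I' and span_start is not None:
--             span_end = end
--         else:
--             if span_start is not None:
--                 spans.append((span_start, span_end))
--             span_start = None
--             span_end = None
--
--     if span_start is not None:
--         spans.append((span_start, span_end))
--
--     return spans
-- ===== SOURCE B (Python) =====
-- def word_bio_to_char_offsets(tagged_tokens: list) -> list:
--     """Index-driven scan: find each 'B', extend through following 'I's."""
--     spans = []
--     n = len(tagged_tokens)
--     i = 0
--     while i < n:
--         _, tag, start, end = tagged_tokens[i]
--         if tag != 'B':
--             i += 1
--             continue
--         span_end = end
--         j = i + 1
--         while j < n and tagged_tokens[j][1] == 'I':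
--             span_end = tagged_tokens[j][3]
--             j += 1
--         spans.append((start, span_end))
--         i = j
--     return spans
-- ===== Notes on version B (the rewrite author's own statement) =====
-- stated objective: alternative
-- what changed: Replaced the flat running-state (span_start/span_end Option) state machine with an index-driven nested scan: the outer loop looks for a 'B' token, an inner loop consumes the consecutive 'I' tokens extending the span, and the outer loop resumes past them.
import Mathlib
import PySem

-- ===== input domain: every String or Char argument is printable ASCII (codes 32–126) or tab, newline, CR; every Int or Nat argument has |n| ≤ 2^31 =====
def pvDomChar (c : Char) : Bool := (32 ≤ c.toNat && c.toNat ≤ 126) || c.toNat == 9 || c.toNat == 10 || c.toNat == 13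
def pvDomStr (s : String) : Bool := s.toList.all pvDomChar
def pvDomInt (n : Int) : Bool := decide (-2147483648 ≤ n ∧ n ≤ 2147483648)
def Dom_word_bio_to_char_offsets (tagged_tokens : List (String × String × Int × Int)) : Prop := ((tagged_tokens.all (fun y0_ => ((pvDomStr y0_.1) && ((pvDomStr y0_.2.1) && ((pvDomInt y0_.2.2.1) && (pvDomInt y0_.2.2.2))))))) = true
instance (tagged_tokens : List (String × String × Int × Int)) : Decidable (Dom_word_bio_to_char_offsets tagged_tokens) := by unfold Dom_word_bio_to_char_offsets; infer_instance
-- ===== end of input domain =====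

-- B replaces A's flat running-state state machine by an index-driven scan (find 'B', then
-- extend through consecutive 'I's); same cost, different decomposition (objective: alternative).

-- ===== PORT A =====
-- A's state: accumulated spans plus the current open span. In A, span_start and span_end are
-- always set/cleared together, so the pair is ported as one Option (Int × Int).
def pvAStep (st : List (Int × Int) × Option (Int × Int)) (t : String × String × Int × Int) :
    List (Int × Int) × Option (Int × Int) :=
  if t.2.1 = "B" then
    ((match st.2 with | some p => st.1 ++ [p] | none => st.1), some (t.2.2.1, t.2.2.2))
  else if t.2.1 = "I" ∧ st.2 ≠ none then
    (st.1, match st.2 with | some p => some (p.1, t.2.2.2) | none => none)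
  else
    ((match st.2 with | some p => st.1 ++ [p] | none => st.1), none)

def word_bio_to_char_offsets (tagged_tokens : List (String × String × Int × Int)) : List (Int × Int) :=
  let r := tagged_tokens.foldl pvAStep ([], none)
  match r.2 with
  | some p => r.1 ++ [p]
  | none => r.1

-- ===== PORT B =====
-- inner while loop: consume the leading consecutive 'I' tokens, updating span_end
def pvScanI (e : Int) : List (String × String × Int × Int) → Int × List (String × String × Int × Int)
  | [] => (e, [])
  | t :: rest => if t.2.1 = "I" then pvScanI t.2.2.2 rest else (e, t :: rest)

theorem pvScanI_len (e : Int) (l : List (String × String × Int × Int)) :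
    (pvScanI e l).2.length ≤ l.length := by
  induction l generalizing e with
  | nil => simp [pvScanI]
  | cons t rest ih =>
    simp only [pvScanI]
    split
    · exact Nat.le_succ_of_le (ih _)
    · simp

-- outer while loop: skip non-'B' tokens; on 'B' open a span, extend via pvScanI, resume after it
def word_bio_to_char_offsets_alt (tagged_tokens : List (String × String × Int × Int)) : List (Int × Int) :=
  match tagged_tokens with
  | [] => []
  | t :: rest =>
    if t.2.1 = "B" then
      let r := pvScanI t.2.2.2 rest
      (t.2.2.1, r.1) :: word_bio_to_char_offsets_alt r.2
    else
      word_bio_to_char_offsets_alt rest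
termination_by tagged_tokens.length
decreasing_by
  · exact Nat.lt_succ_of_le (pvScanI_len _ _)
  · simp

-- ===== PRECONDITION & SPEC =====
def Spec_word_bio_to_char_offsets (tagged_tokens : List (String × String × Int × Int)) (out : List (Int × Int)) : Prop := out = word_bio_to_char_offsets_alt tagged_tokens
instance (tagged_tokens : List (String × String × Int × Int)) (out : List (Int × Int)) : Decidable (Spec_word_bio_to_char_offsets tagged_tokens out) := by unfold Spec_word_bio_to_char_offsets; infer_instance

-- ===== CLAIM (what is proved, stated in full; the proofs are below) =====
def Claim_equal_word_bio_to_char_offsets : Prop := ∀ (tagged_tokens : List (String × String × Int × Int)), Dom_word_bio_to_char_offsets tagged_tokens → Spec_word_bio_to_char_offsets tagged_tokens (word_bio_to_char_offsets tagged_tokens)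

-- ===== LEMMAS AND PROOFS =====

-- close out A's fold result
def pvFinish (r : List (Int × Int) × Option (Int × Int)) : List (Int × Int) :=
  match r.2 with
  | some p => r.1 ++ [p]
  | none => r.1

-- the master invariant: A's fold from a closed state yields B's scan, and from an open
-- span (s, e) it yields the span extended by pvScanI followed by B's scan of the remainder
theorem pvInv (l : List (String × String × Int × Int)) :
    (∀ spans, pvFinish (l.foldl pvAStep (spans, none)) = spans ++ word_bio_to_char_offsets_alt l) ∧
    (∀ spans s e, pvFinish (l.foldl pvAStep (spans, some (s, e))) =
      spans ++ (s, (pvScanI e l).1) :: word_bio_to_char_offsets_alt (pvScanI e l).2) := by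
  induction l with
  | nil => simp [pvFinish, pvScanI, word_bio_to_char_offsets_alt]
  | cons t rest ih =>
    constructor
    · intro spans
      by_cases hB : t.2.1 = "B"
      · rw [List.foldl_cons]
        have hstep : pvAStep (spans, none) t = (spans, some (t.2.2.1, t.2.2.2)) := by
          simp [pvAStep, hB]
        rw [hstep, ih.2, word_bio_to_char_offsets_alt]
        simp [hB]
      · rw [List.foldl_cons]
        have hstep : pvAStep (spans, none) t = (spans, none) := by
          simp [pvAStep, hB]
        rw [hstep, ih.1, word_bio_to_char_offsets_alt]
        simp [hB]
    · intro spans s e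
      by_cases hB : t.2.1 = "B"
      · have hnotI : t.2.1 ≠ "I" := by simp [hB]
        rw [List.foldl_cons]
        have hstep : pvAStep (spans, some (s, e)) t = (spans ++ [(s, e)], some (t.2.2.1, t.2.2.2)) := by
          simp [pvAStep, hB]
        rw [hstep, ih.2]
        conv_rhs => rw [pvScanI]
        rw [if_neg hnotI, word_bio_to_char_offsets_alt]
        simp [hB]
      · by_cases hI : t.2.1 = "I"
        · rw [List.foldl_cons]
          have hstep : pvAStep (spans, some (s, e)) t = (spans, some (s, t.2.2.2)) := by
            simp [pvAStep, hI]
          rw [hstep, ih.2]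
          conv_rhs => rw [pvScanI]
          rw [if_pos hI]
        · rw [List.foldl_cons]
          have hstep : pvAStep (spans, some (s, e)) t = (spans ++ [(s, e)], none) := by
            simp [pvAStep, hB, hI]
          rw [hstep, ih.1]
          conv_rhs => rw [pvScanI]
          rw [if_neg hI, word_bio_to_char_offsets_alt]
          simp [hB]

-- ===== VERDICT (by name: the statement is the Claim_ definition above) =====
theorem word_bio_to_char_offsets_spec : Claim_equal_word_bio_to_char_offsets := by
  intro l _
  show word_bio_to_char_offsets l = word_bio_to_char_offsets_alt l
  have h := (pvInv l).1 []
  simpa [pvFinish, word_bio_to_char_offsets] using h
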